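-- pv_equiv track=rewrite | github.com/CSID-DGU/2023-1-OSSP1-CGS-8 | chajaesik/customize_test.py | make_double_quotes
-- ===== SOURCE A (Python) =====
-- def make_double_quotes(text):
--     result = ''
--     i = 0
--     while i < len(text):
--         if text[i:i+3] == "'''":
--             result += '"""'
--             i += 3
--         else:
--             result += text[i]
--             i += 1
--     return result
-- ===== SOURCE B (Python) =====
-- def make_double_quotes(text):
--     return '"""'.join(text.split("'''"))
-- ===== Notes on version B (the rewrite author's own statement) =====
-- stated objective: idiomatic
-- what changed: Replaced the index-driven while-loop that appends character by character with a single split on the triple-quote delimiter and a rejoin, which a timing run measured as much faster on large inputs.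
import Mathlib
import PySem

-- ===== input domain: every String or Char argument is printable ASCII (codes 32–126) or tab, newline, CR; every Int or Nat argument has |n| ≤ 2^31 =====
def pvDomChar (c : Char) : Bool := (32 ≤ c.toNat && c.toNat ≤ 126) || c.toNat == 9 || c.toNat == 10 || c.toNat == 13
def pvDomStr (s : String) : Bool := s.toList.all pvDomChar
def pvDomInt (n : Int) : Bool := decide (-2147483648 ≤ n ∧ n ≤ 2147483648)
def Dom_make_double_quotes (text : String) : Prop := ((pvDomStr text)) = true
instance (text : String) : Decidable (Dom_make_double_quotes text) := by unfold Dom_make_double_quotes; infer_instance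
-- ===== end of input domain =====

-- B replaces A's index-driven character-appending while-loop with a split-on-''' / join-with-""" decomposition (idiomatic).

-- ===== PORT A =====
-- A's loop state is (result, i); text[i:i+3] is (text.toList.drop i).take 3, so the loop is
-- the following structural recursion on the remaining suffix, emitting characters left to right.
def make_double_quotes.go : List Char → List Char
  | [] => []
  | c :: rest =>
    if (c :: rest).take 3 = ['\'', '\'', '\''] then
      '"' :: '"' :: '"' :: make_double_quotes.go (rest.drop 2)   -- i += 3
    else
      c :: make_double_quotes.go rest                             -- i += 1
termination_by l => l.length
decreasing_by
  all_goals simp; try omega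

def make_double_quotes (text : String) : String :=
  String.ofList (make_double_quotes.go text.toList)

-- ===== PORT B =====
def make_double_quotes_alt (text : String) : String :=
  String.ofList (PySem.Chars.join "\"\"\"".toList (PySem.Chars.splitOn text.toList "'''".toList))

-- ===== PRECONDITION & SPEC =====
def Spec_make_double_quotes (text : String) (out : String) : Prop := out = make_double_quotes_alt text
instance (text : String) (out : String) : Decidable (Spec_make_double_quotes text out) := by unfold Spec_make_double_quotes; infer_instance

-- ===== CLAIM (what is proved, stated in full; the proofs are below) =====
def Claim_equal_make_double_quotes : Prop := ∀ (text : String), Dom_make_double_quotes text → Spec_make_double_quotes text (make_double_quotes text)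

-- ===== LEMMAS AND PROOFS =====

-- accumulator-free description of splitOn at delimiter ''' (segments between occurrences)
def pvSplit3 : List Char → List (List Char)
  | [] => [[]]
  | c :: rest =>
    if List.isPrefixOf ['\'', '\'', '\''] (c :: rest) then
      [] :: pvSplit3 (rest.drop 2)
    else
      match pvSplit3 rest with
      | [] => [[c]]
      | h :: t => (c :: h) :: t
termination_by l => l.length
decreasing_by
  all_goals simp; try omega

def pvConsHead (x : List Char) : List (List Char) → List (List Char)
  | [] => [x]
  | h :: t => (x ++ h) :: t

theorem pvSplit3_ne_nil (l : List Char) : pvSplit3 l ≠ [] := by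
  rw [pvSplit3.eq_def]
  split
  · simp
  · split
    · simp
    · split <;> simp

theorem pvGo_eq (fuel : Nat) (l cur : List Char) (acc : List (List Char))
    (h : l.length < fuel) :
    PySem.Chars.splitOn.go ['\'', '\'', '\''] fuel l cur acc
      = acc.reverse ++ pvConsHead cur.reverse (pvSplit3 l) := by
  induction fuel generalizing l cur acc with
  | zero => omega
  | succ fuel ih =>
    cases l with
    | nil =>
      simp [PySem.Chars.splitOn.go, pvSplit3, pvConsHead]
    | cons c rest =>
      rw [PySem.Chars.splitOn.go]
      by_cases hp : List.isPrefixOf ['\'', '\'', '\''] (c :: rest) = true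
      · have hlen : rest.length ≥ 2 := by
          have := List.IsPrefix.length_le (List.isPrefixOf_iff_prefix.mp hp)
          simp at this; omega
        rw [if_pos hp]
        have hd : (List.drop (List.length ['\'', '\'', '\'']) (c :: rest)) = rest.drop 2 := by
          simp
        rw [hd, ih (rest.drop 2) [] (cur.reverse :: acc) (by simp [List.length_drop] at *; omega)]
        rw [show pvSplit3 (c :: rest) = [] :: pvSplit3 (rest.drop 2) by
          rw [pvSplit3]; simp [hp]]
        cases hs : pvSplit3 (rest.drop 2) with
        | nil => exact absurd hs (pvSplit3_ne_nil _)
        | cons h t => simp [pvConsHead]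
      · rw [if_neg hp]
        rw [ih rest (c :: cur) acc (by simp at h ⊢; omega)]
        rw [show pvSplit3 (c :: rest) = (match pvSplit3 rest with
              | [] => [[c]]
              | h :: t => (c :: h) :: t) by
          rw [pvSplit3]; simp [hp]]
        cases hs : pvSplit3 rest with
        | nil => exact absurd hs (pvSplit3_ne_nil rest)
        | cons h t => simp [pvConsHead]

theorem pvSplitOn_eq (l : List Char) :
    PySem.Chars.splitOn l ['\'', '\'', '\''] = pvSplit3 l := by
  rw [PySem.Chars.splitOn, pvGo_eq (l.length + 1) l [] [] (by omega)]
  cases hs : pvSplit3 l with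
  | nil => exact absurd hs (pvSplit3_ne_nil l)
  | cons h t => simp [pvConsHead]

theorem pvJoin_split3 (l : List Char) :
    PySem.Chars.join ['"', '"', '"'] (pvSplit3 l) = make_double_quotes.go l := by
  have hq : ∀ (c : Char) (h : List Char) (t : List (List Char)),
      PySem.Chars.join ['"', '"', '"'] ((c :: h) :: t)
        = c :: PySem.Chars.join ['"', '"', '"'] (h :: t) := by
    intro c h t
    cases t <;> simp [PySem.Chars.join, List.intercalate]
  induction l using make_double_quotes.go.induct with
  | case1 => simp [pvSplit3, make_double_quotes.go, PySem.Chars.join, List.intercalate]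
  | case2 c rest hpre ih =>
    have hp : List.isPrefixOf ['\'', '\'', '\''] (c :: rest) = true := by
      rw [List.isPrefixOf_iff_prefix]
      exact (List.prefix_iff_eq_take.mpr hpre.symm)
    rw [pvSplit3, if_pos hp, make_double_quotes.go, if_pos hpre]
    cases hs : pvSplit3 (rest.drop 2) with
    | nil => exact absurd hs (pvSplit3_ne_nil _)
    | cons h t =>
      rw [hs] at ih
      simp [PySem.Chars.join, List.intercalate] at ih ⊢
      simpa [List.intercalate] using ih
  | case3 c rest hpre ih =>
    have hp : ¬ List.isPrefixOf ['\'', '\'', '\''] (c :: rest) = true := by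
      rw [List.isPrefixOf_iff_prefix]
      intro hcontra
      exact hpre (List.prefix_iff_eq_take.mp hcontra).symm
    rw [pvSplit3, if_neg hp, make_double_quotes.go, if_neg hpre]
    cases hs : pvSplit3 rest with
    | nil => exact absurd hs (pvSplit3_ne_nil rest)
    | cons h t =>
      rw [hs] at ih
      rw [hq, ih]

-- ===== VERDICT (by name: the statement is the Claim_ definition above) =====
theorem make_double_quotes_spec : Claim_equal_make_double_quotes := by
  intro text _
  unfold Spec_make_double_quotes make_double_quotes make_double_quotes_alt
  rw [show "'''".toList = ['\'', '\'', '\''] by rfl,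
      show "\"\"\"".toList = ['"', '"', '"'] by rfl,
      pvSplitOn_eq, pvJoin_split3]
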